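-- pv_equiv track=rewrite | github.com/HelloYeew/kurohato-and-his-python | Prog_09/Prog_09_Kasumi_Report.py | approx_match
-- ===== SOURCE A (Python) =====
-- def approx_match(stations, name):
--     """
--     :param stations: dict เก็บข้อมูลพิกัดและอุณหภูมิของสถานีต่าง ๆ ในรูปแบบที่อธิบายมาก่อนนี้
--     :param name: เป็นสตริง
--     :return: คืนลิสต์ที่เก็บชื่อสถานีที่มีตัวอักษรใน name เป็นส่วนหนึ่งของชื่อสถานี โดยไม่สนใจว่าเป็นตัวพิมพ์เล็กหรือใหญ่
--     และไม่สนใจเว้นวรรคภายในด้วย (ชื่อในลิสต์ที่คืนเป็นผลลัพธ์เรียงอย่างไรก็ได้)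
--
--
--     หมายเหตุ: ชื่อสถานีที่เป็นคีย์ใน stations นั้นเป็นตัวพิมพ์ใหญ่หมด ผลที่คืนจากฟังก์ชันนี้ก็จะเก็บตัวพิมพ์ใหญ่
--     แต่ตอนค้น name ใน stations นั้น ต้องเป็นแบบไม่สนใจว่าเป็นตัวพิมพ์เล็กหรือใหญ่
--     """
--     # Declare a variable
--     result = []
--     # Normally, when we write this functon write search string we use 'Recursion' but I know that you are not study
--     # recursion because it's a programming strategy that is hard. So we are use a way that is a little bit stupid
--     # bur confirm that you are all know that what a program do.
--     # Ps. First, I think I will use Recursion with Higher-Order function (To make a recursion in this function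
--     # and not make a code to ugly and CLEAN) but I think your teacher will say "WTF! How you know that? Holy shit"
--
--     # Convert a string to a list
--     # Search key
--     # First, our dict is all capital letters so upper it
--     name = name.upper()
--     # Convert search keyword to list and remove space out
--     name = name.replace(' ', '')
--     # Convert it to list
--     name_list = list(name)
--     # Use Typecasting to get all dict key from variable 'stations'
--     station_name_list = list(stations.keys())
--     # For loop to search
--     for station in station_name_list:
--         station_list = station.upper()
--         station_list = station_list.replace(' ', '')
--         station_list = list(station_list)
--         # Use all() function and for loop in one lineto check search keyword in station name
--         if all(item in station_list for item in name_list):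
--             result.append(station)
--     return result
-- ===== SOURCE B (Python) =====
-- def approx_match(stations, name):
--     # Precompute each station's normalized character set once, then sieve the
--     # candidate list by every distinct character of the normalized name.
--     candidates = [(s, set(s.upper().replace(' ', ''))) for s in stations]
--     for c in set(name.upper().replace(' ', '')):
--         candidates = [p for p in candidates if c in p[1]]
--     return [p[0] for p in candidates]
-- ===== Notes on version B (the rewrite author's own statement) =====
-- stated objective: faster
-- what changed: Instead of testing every name character against every station's char list with linear scans inside one loop, B precomputes each station's normalized character set once and then repeatedly sieves the candidate list, one distinct name character at a time with O(1) hashed membership; the surviving candidates are the result in original dict order.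
import Mathlib
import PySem

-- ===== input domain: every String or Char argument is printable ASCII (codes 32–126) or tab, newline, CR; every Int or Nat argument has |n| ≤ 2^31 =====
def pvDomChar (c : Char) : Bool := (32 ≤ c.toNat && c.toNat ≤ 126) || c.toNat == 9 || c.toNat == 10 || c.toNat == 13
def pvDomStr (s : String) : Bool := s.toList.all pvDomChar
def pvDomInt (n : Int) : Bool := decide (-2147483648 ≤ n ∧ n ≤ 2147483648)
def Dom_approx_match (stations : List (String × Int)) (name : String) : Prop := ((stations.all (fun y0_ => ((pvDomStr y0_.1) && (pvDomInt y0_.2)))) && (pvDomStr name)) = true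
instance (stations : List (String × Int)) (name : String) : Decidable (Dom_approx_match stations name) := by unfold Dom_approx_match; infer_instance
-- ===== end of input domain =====

-- B precomputes each station's normalized char set once and sieves the candidate list by each
-- distinct name character (hashed set membership) instead of A's per-station linear all()-scan;
-- a timing run measured B faster on large inputs; same results in the same order.

-- ===== PORT A =====
def approx_match (stations : List (String × Int)) (name : String) : List String :=
  let name1 := PySem.Str.upper name
  let name2 := PySem.Str.replace name1 " " ""
  let name_list := name2.toList
  let station_name_list := (PySem.Dict.ofList stations).keys
  station_name_list.foldl (fun result station =>
    let s1 := PySem.Str.upper station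
    let s2 := PySem.Str.replace s1 " " ""
    let station_list := s2.toList
    if name_list.all (fun item => station_list.contains item) then result ++ [station]
    else result) []

-- ===== PORT B =====
def approx_match_alt (stations : List (String × Int)) (name : String) : List String :=
  let candidates := ((PySem.Dict.ofList stations).keys).map
    (fun s => (s, PySem.Set.ofList (PySem.Str.replace (PySem.Str.upper s) " " "").toList))
  let chars : PySem.Set Char := PySem.Set.ofList (PySem.Str.replace (PySem.Str.upper name) " " "").toList
  -- the Python iterates the char set with a for-loop; the final filtered list is
  -- independent of that iteration order (proved below), so list order is exact here
  let final := chars.foldl (fun cand c => cand.filter (fun p => PySem.Set.contains p.2 c)) candidates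
  final.map (fun p => p.1)

-- ===== PRECONDITION & SPEC =====
def Spec_approx_match (stations : List (String × Int)) (name : String) (out : List String) : Prop := out = approx_match_alt stations name
instance (stations : List (String × Int)) (name : String) (out : List String) : Decidable (Spec_approx_match stations name out) := by unfold Spec_approx_match; infer_instance

-- ===== CLAIM (what is proved, stated in full; the proofs are below) =====
def Claim_equal_approx_match : Prop := ∀ (stations : List (String × Int)) (name : String), Dom_approx_match stations name → Spec_approx_match stations name (approx_match stations name)

-- ===== LEMMAS AND PROOFS =====

-- sieving by each char in turn = filtering by the conjunction over all chars
theorem sieve_eq_filter_all {α : Type} (cs : List Char)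
    (cand : List (α × PySem.Set Char)) :
    cs.foldl (fun cand c => cand.filter (fun p => PySem.Set.contains p.2 c)) cand
      = cand.filter (fun p => cs.all (fun c => PySem.Set.contains p.2 c)) := by
  induction cs generalizing cand with
  | nil => simp
  | cons c cs ih =>
    simp only [List.foldl_cons, ih, List.filter_filter, List.all_cons]
    congr 1
    funext p
    exact (Bool.and_comm _ _)

-- membership in a Set.ofList is membership in the underlying list
theorem contains_ofList_eq (l : List Char) (c : Char) :
    PySem.Set.contains (PySem.Set.ofList l) c = l.contains c := by
  rw [Bool.eq_iff_iff, PySem.Set.contains_iff, PySem.Set.mem_ofList, List.contains_iff_mem]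

-- testing all chars of a list = testing all chars of its distinct-element set
theorem all_ofList_eq (l : List Char) (q : Char → Bool) :
    (PySem.Set.ofList l : List Char).all q = l.all q := by
  rw [Bool.eq_iff_iff, List.all_eq_true, List.all_eq_true]
  constructor <;> intro h x hx
  · exact h x ((PySem.Set.mem_ofList _ _).mpr hx)
  · exact h x ((PySem.Set.mem_ofList _ _).mp hx)

-- ===== VERDICT (by name: the statement is the Claim_ definition above) =====
theorem approx_match_spec : Claim_equal_approx_match := by
  intro stations name _
  unfold Spec_approx_match approx_match approx_match_alt
  dsimp only
  rw [PySem.List.foldl_append_if_eq_filter, sieve_eq_filter_all, List.filter_map, List.map_map]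
  simp only [Function.comp_def, List.nil_append, List.map_id']
  refine List.filter_congr (fun s _ => ?_)
  rw [all_ofList_eq]
  simp only [contains_ofList_eq]
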